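-- pv_equiv track=rewrite | github.com/Brodski/Other-Projects | Google Foobar/Level_4_freeBunnies/finalBunny.py | solution
-- ===== SOURCE A (Python) =====
-- import itertools
--
-- def solution(num_buns, num_required):
--
--     '''
--     (Recall: pigeon hole principle)
--     Goal: We evenly distribute x keys to n bunnies such that any required "r" number of those bunnies
--     will always have q unique keys and no set of r-1 bunnies has q unique keys.
--
--     Observe:  p = buns - req + 1    ...(I call it pigeon hole variable)
--     The final answer will be a 2d matrix. We know the # of rows = num_buns, but we do not know
--     the # of keys, # of cols, or how to distribute them
--     (Note chart below) Use num buns to gaurantue each item appears in any required "r" number of sets. We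
--     subtract r since r-1 bunnies cannot have q unique keys and +1 to avoid double counting last element
--     from r variable
--
--
--                     cols
--                  ____________
--                 | x x x ... r  \
--     buns = rows | x x x ... r    require number
--                 | x x x ... r  /
--                 | x x x ... x
--
--         So n Choose r = num_buns Choose num_required
--                       = number of keys.
--
--
--     Embedded in this n choose r is the answer of how to evenly distribute to the bunnies.
--     Note the sets combinations. We distribute items (keys) to each bunny as specified
--     by the cobmination
--
--                      Bunny at row:
--         key # 0 --> (0, 1, 2, 3, 4)
--         key # 1 --> (0, 1, 2, 3, 5)
--         key # 2 --> (0, 1, 2, 3, 6)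
--         key # 3 --> (0, 1, 2, 4, 5)
--                   ...
--     '''
--     bunnyKeys = [[] for num in range(num_buns)]
--
--     p = num_buns - num_required + 1
--     combos = itertools.combinations(range(num_buns), p)
--     for key, bunnies in enumerate(combos):
--         for bunny in bunnies:
--             bunnyKeys[bunny].append(key)
--
--     return bunnyKeys
-- ===== SOURCE B (Python) =====
-- import itertools
--
-- def solution(num_buns, num_required):
--     # Flatten to (bunny, key) pairs, sort, group by bunny, then read each bunny's keys off the groups.
--     combos = list(itertools.combinations(range(num_buns), num_buns - num_required + 1))
--     pairs = sorted((b, i) for i, c in enumerate(combos) for b in c)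
--     grouped = {b: [i for _, i in grp] for b, grp in itertools.groupby(pairs, key=lambda t: t[0])}
--     return [grouped.get(b, []) for b in range(num_buns)]
-- ===== Notes on version B (the rewrite author's own statement) =====
-- stated objective: alternative
-- what changed: Replaces A's scatter pass (append each key into a mutable per-bunny list while iterating the combinations) by flatten-sort-group: emit all (bunny, key) pairs, sort them, group by bunny with itertools.groupby into a dict, and read each bunny's key list off the dict.
import Mathlib
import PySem

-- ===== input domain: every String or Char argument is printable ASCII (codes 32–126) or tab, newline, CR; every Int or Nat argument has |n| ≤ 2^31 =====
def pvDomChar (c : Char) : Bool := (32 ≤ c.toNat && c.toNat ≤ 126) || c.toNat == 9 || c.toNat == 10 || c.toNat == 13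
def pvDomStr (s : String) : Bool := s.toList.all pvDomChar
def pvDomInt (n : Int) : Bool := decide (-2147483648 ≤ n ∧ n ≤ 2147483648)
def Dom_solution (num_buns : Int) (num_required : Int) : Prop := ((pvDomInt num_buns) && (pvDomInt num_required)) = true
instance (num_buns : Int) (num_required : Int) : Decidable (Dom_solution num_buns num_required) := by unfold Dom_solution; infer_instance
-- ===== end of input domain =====

-- B replaces A's scatter over the combination list by flatten-to-(bunny,key)-pairs, sort, group by bunny, look up.

-- itertools.combinations(pool, r), i.e. PySem.List.combinations (proved equal below), written with
-- CPython's `if r > n: return` pruning at each level so that evaluation is output-proportional like itertools.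
def pyCombinations {α : Type} (xs : List α) (r : Nat) : List (List α) :=
  if xs.length < r then []
  else match xs, r with
    | _, 0 => [[]]
    | [], _ + 1 => []
    | x :: t, r' + 1 => (pyCombinations t r').map (x :: ·) ++ pyCombinations t (r' + 1)

-- ===== PORT A =====
-- bunnies come from range(num_buns), so every bunny index is nonnegative: `.toNat` on it is exact.
def solution (num_buns : Int) (num_required : Int) : List (List Int) :=
  let bunnyKeys : List (List Int) := (List.range num_buns.toNat).map (fun _ => ([] : List Int))
  let p : Int := num_buns - num_required + 1
  let combos := pyCombinations (PySem.List.pyRange 0 num_buns 1) p.toNat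
  (PySem.List.enumerate combos 0).foldl
    (fun acc kb =>
      kb.2.foldl (fun a bunny => a.set bunny.toNat (a.getD bunny.toNat [] ++ [kb.1])) acc)
    bunnyKeys

-- ===== PORT B =====
-- itertools.groupby(xs, key=fst) as consumed by B's dict comprehension: the maximal runs of equal first component.
def pyGroupbyFst : List (Int × Int) → List (Int × List (Int × Int))
  | [] => []
  | x :: xs =>
    match pyGroupbyFst xs with
    | [] => [(x.1, [x])]
    | (k, g) :: rest => if x.1 = k then (k, x :: g) :: rest else (x.1, [x]) :: (k, g) :: rest

-- Python's default comparison on int pairs is lexicographic: the sort key `toLex` gives exactly that order.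
def solution_alt (num_buns : Int) (num_required : Int) : List (List Int) :=
  let combos := pyCombinations (PySem.List.pyRange 0 num_buns 1) (num_buns - num_required + 1).toNat
  let pairs : List (Int × Int) :=
    (PySem.List.enumerate combos 0).flatMap (fun ic => ic.2.map (fun b => (b, ic.1)))
  let spairs := PySem.List.sorted pairs (fun t => toLex t)
  let grouped : PySem.Dict Int (List Int) :=
    (pyGroupbyFst spairs).foldl (fun d bg => d.insert bg.1 (bg.2.map (·.2))) PySem.Dict.empty
  (PySem.List.pyRange 0 num_buns 1).map (fun b => grouped.getD b [])

-- ===== PRECONDITION & SPEC =====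
-- A raises ValueError (negative r handed to itertools.combinations) iff num_buns - num_required + 1 < 0; exactly those inputs are excluded.
def Pre_solution (num_buns : Int) (num_required : Int) : Prop := 0 ≤ num_buns - num_required + 1
instance (num_buns : Int) (num_required : Int) : Decidable (Pre_solution num_buns num_required) := by unfold Pre_solution; infer_instance
def pvWitness_solution : Int × Int := (4, 4)

def Spec_solution (num_buns : Int) (num_required : Int) (out : List (List Int)) : Prop := out = solution_alt num_buns num_required
instance (num_buns : Int) (num_required : Int) (out : List (List Int)) : Decidable (Spec_solution num_buns num_required out) := by unfold Spec_solution; infer_instance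

-- ===== CLAIM (what is proved, stated in full; the proofs are below) =====
def Claim_equal_solution : Prop := ∀ (num_buns : Int) (num_required : Int), Dom_solution num_buns num_required → Pre_solution num_buns num_required → Spec_solution num_buns num_required (solution num_buns num_required)

-- ===== LEMMAS AND PROOFS =====

-- the pruning only skips subtrees whose combination list is empty anyway
theorem pyCombinations_eq {α : Type} (xs : List α) (r : Nat) :
    pyCombinations xs r = PySem.List.combinations xs r := by
  induction xs generalizing r with
  | nil =>
    rw [pyCombinations.eq_def]
    cases r with
    | zero => simp [PySem.List.combinations_zero]
    | succ n => simp [PySem.List.combinations_nil_succ]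
  | cons x t ih =>
    rw [pyCombinations.eq_def]
    split_ifs with h
    · exact (PySem.List.combinations_eq_nil_of_length_lt _ h).symm
    · cases r with
      | zero => simp [PySem.List.combinations_zero]
      | succ n => simp [ih, PySem.List.combinations_cons_succ]

-- A's inner loop: the fold only sets existing slots, so the length is preserved.
theorem inner_length (c : List Int) (k : Int) (acc : List (List Int)) :
    (c.foldl (fun a bunny => a.set bunny.toNat (a.getD bunny.toNat [] ++ [k])) acc).length
      = acc.length := by
  induction c generalizing acc with
  | nil => rfl
  | cons x xs ih => rw [List.foldl_cons, ih]; simp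

-- the per-bunny key list both sides compute: keys of the enumerated combinations containing b
def Gkeys (combos : List (List Int)) (b : Int) : List Int :=
  (PySem.List.enumerate combos 0).filterMap (fun ic => if b ∈ ic.2 then some ic.1 else none)

-- A's inner loop (append key k to the slot of each bunny of one combination c): slot j gains [k] iff j is a bunny of c.
theorem inner_get (c : List Int) (k : Int) (acc : List (List Int))
    (hnd : c.Nodup) (hb : ∀ x ∈ c, 0 ≤ x ∧ x.toNat < acc.length) (j : Nat) :
    (c.foldl (fun a bunny => a.set bunny.toNat (a.getD bunny.toNat [] ++ [k])) acc)[j]?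
      = acc[j]?.map (fun l => l ++ (if (j : Int) ∈ c then [k] else [])) := by
  induction c generalizing acc with
  | nil => simp
  | cons x xs ih =>
    obtain ⟨hx0, hxl⟩ := hb x (List.mem_cons_self)
    rw [List.foldl_cons,
      ih (acc.set x.toNat (acc.getD x.toNat [] ++ [k])) hnd.of_cons
        (fun y hy => by
          simpa using hb y (List.mem_cons_of_mem _ hy))]
    by_cases hjx : (j : Int) = x
    · have hxj : x.toNat = j := by omega
      have hjl : j < acc.length := hxj ▸ hxl
      have hxxs : x ∉ xs := (List.nodup_cons.mp hnd).1
      rw [hxj, List.getElem?_set_self hjl, List.getD_eq_getElem _ _ hjl,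
        List.getElem?_eq_getElem hjl]
      simp [List.mem_cons, hjx, hxxs]
    · have hxj : x.toNat ≠ j := by omega
      rw [List.getElem?_set_ne hxj]
      simp [List.mem_cons, hjx]

-- A's outer loop over the enumerated combination list, pointwise: scatter realises the per-bunny gather Gkeys.
theorem outer_get (pairs : List (Int × List Int)) (acc : List (List Int))
    (hall : ∀ p ∈ pairs, p.2.Nodup ∧ ∀ x ∈ p.2, 0 ≤ x ∧ x.toNat < acc.length) (j : Nat) :
    (pairs.foldl
        (fun acc kb =>
          kb.2.foldl (fun a bunny => a.set bunny.toNat (a.getD bunny.toNat [] ++ [kb.1])) acc)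
        acc)[j]?
      = acc[j]?.map (fun l =>
          l ++ pairs.filterMap (fun ic => if (j : Int) ∈ ic.2 then some ic.1 else none)) := by
  induction pairs generalizing acc with
  | nil => simp
  | cons p rest ih =>
    have hp := hall p List.mem_cons_self
    have hlen : (p.2.foldl (fun a bunny => a.set bunny.toNat (a.getD bunny.toNat [] ++ [p.1])) acc).length
        = acc.length := inner_length p.2 p.1 acc
    rw [List.foldl_cons,
      ih _ (fun q hq => by rw [hlen]; exact hall q (List.mem_cons_of_mem _ hq)),
      inner_get p.2 p.1 acc hp.1 hp.2 j]
    by_cases hjc : (j : Int) ∈ p.2 <;>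
      cases acc[j]? <;> simp [hjc]

-- Gkeys is strictly increasing (keys come from enumerate in order)
theorem Gkeys_pairwise (combos : List (List Int)) (b : Int) :
    (Gkeys combos b).Pairwise (· < ·) := by
  unfold Gkeys
  rw [List.pairwise_filterMap]
  refine (PySem.List.pairwise_lt_enumerate combos 0).imp ?_
  intro p q h x hx y hy
  split_ifs at hx hy
  all_goals simp_all

theorem mem_Gkeys (combos : List (List Int)) (b i : Int) :
    i ∈ Gkeys combos b ↔ ∃ ic ∈ PySem.List.enumerate combos 0, b ∈ ic.2 ∧ ic.1 = i := by
  unfold Gkeys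
  rw [List.mem_filterMap]
  constructor
  · rintro ⟨ic, h1, h2⟩
    split_ifs at h2 with hb
    exact ⟨ic, h1, hb, Option.some.inj h2⟩
  · rintro ⟨ic, h1, hb, rfl⟩
    exact ⟨ic, h1, by simp [hb]⟩

-- the sorted pair list, block by block: bunnies in range order, each with its Gkeys
theorem L_pairwise (nb : Int) (combos : List (List Int)) :
    ((PySem.List.pyRange 0 nb 1).flatMap
        (fun b => (Gkeys combos b).map (fun i => (b, i)))).Pairwise
      (fun s t => toLex s < toLex t) := by
  rw [List.pairwise_flatMap]
  constructor
  · intro b _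
    rw [List.pairwise_map]
    refine (Gkeys_pairwise combos b).imp ?_
    intro i i' h
    rw [Prod.Lex.toLex_lt_toLex]
    exact Or.inr ⟨rfl, h⟩
  · refine (PySem.List.pairwise_lt_pyRange_one 0 nb).imp ?_
    intro a b hab x hx y hy
    rcases List.mem_map.mp hx with ⟨i, _, rfl⟩
    rcases List.mem_map.mp hy with ⟨i', _, rfl⟩
    rw [Prod.Lex.toLex_lt_toLex]
    exact Or.inl hab

theorem L_nodup (nb : Int) (combos : List (List Int)) :
    ((PySem.List.pyRange 0 nb 1).flatMap
        (fun b => (Gkeys combos b).map (fun i => (b, i)))).Nodup := by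
  refine (L_pairwise nb combos).imp ?_
  intro s t h he
  rw [he] at h
  exact lt_irrefl _ h

theorem P_nodup (combos : List (List Int)) (hnd : ∀ c ∈ combos, c.Nodup) :
    ((PySem.List.enumerate combos 0).flatMap
        (fun ic => ic.2.map (fun b => (b, ic.1)))).Nodup := by
  apply List.pairwise_flatMap.mpr
  constructor
  · intro ic hic
    obtain ⟨k, hk, rfl⟩ := (PySem.List.mem_enumerate_iff _ _ _).mp hic
    rw [List.pairwise_map]
    refine (hnd _ (List.getElem_mem hk)).imp ?_
    intro a b hab he
    exact hab (congrArg Prod.fst he)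
  · refine (PySem.List.pairwise_lt_enumerate combos 0).imp ?_
    intro p q h x hx y hy
    rcases List.mem_map.mp hx with ⟨b, _, rfl⟩
    rcases List.mem_map.mp hy with ⟨b', _, rfl⟩
    intro he
    have : p.1 = q.1 := congrArg Prod.snd he
    omega

theorem mem_P (combos : List (List Int)) (x : Int × Int) :
    x ∈ (PySem.List.enumerate combos 0).flatMap (fun ic => ic.2.map (fun b => (b, ic.1)))
      ↔ ∃ ic ∈ PySem.List.enumerate combos 0, x.1 ∈ ic.2 ∧ ic.1 = x.2 := by
  rw [List.mem_flatMap]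
  constructor
  · rintro ⟨ic, h1, h2⟩
    rcases List.mem_map.mp h2 with ⟨b, hb, rfl⟩
    exact ⟨ic, h1, hb, rfl⟩
  · rintro ⟨ic, h1, hb, h2⟩
    refine ⟨ic, h1, List.mem_map.mpr ⟨x.1, hb, ?_⟩⟩
    rw [h2]

-- sorting the flattened pairs yields exactly the bunny-blocks form
theorem spairs_eq (nb : Int) (combos : List (List Int))
    (hsub : ∀ c ∈ combos, c.Sublist (PySem.List.pyRange 0 nb 1)) :
    PySem.List.sorted
        ((PySem.List.enumerate combos 0).flatMap (fun ic => ic.2.map (fun b => (b, ic.1))))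
        (fun t => toLex t)
      = (PySem.List.pyRange 0 nb 1).flatMap (fun b => (Gkeys combos b).map (fun i => (b, i))) := by
  have hnd : ∀ c ∈ combos, c.Nodup :=
    fun c hc => (PySem.List.nodup_pyRange_one 0 nb).sublist (hsub c hc)
  apply PySem.List.sorted_eq_of_perm_of_pairwise_lt _ _ _ ?_ (L_pairwise nb combos)
  rw [List.perm_ext_iff_of_nodup (L_nodup nb combos) (P_nodup combos hnd)]
  intro x
  rw [mem_P, List.mem_flatMap]
  constructor
  · rintro ⟨b, hb, hx⟩
    rcases List.mem_map.mp hx with ⟨i, hi, rfl⟩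
    rcases (mem_Gkeys combos b i).mp hi with ⟨ic, h1, h2, h3⟩
    exact ⟨ic, h1, h2, h3⟩
  · rintro ⟨ic, h1, hb, h2⟩
    refine ⟨x.1, ?_, List.mem_map.mpr ⟨x.2, (mem_Gkeys combos x.1 x.2).mpr ⟨ic, h1, hb, h2⟩, rfl⟩⟩
    obtain ⟨k, hk, rfl⟩ := (PySem.List.mem_enumerate_iff _ _ _).mp h1
    exact (hsub _ (List.getElem_mem hk)).mem hb

theorem pyGroupbyFst_cons (x : Int × Int) (xs : List (Int × Int)) :
    pyGroupbyFst (x :: xs)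
      = match pyGroupbyFst xs with
        | [] => [(x.1, [x])]
        | (k, g) :: rest =>
          if x.1 = k then (k, x :: g) :: rest else (x.1, [x]) :: (k, g) :: rest := rfl

-- every group key produced by pyGroupbyFst is the key of some element of the input
theorem key_mem_pyGroupbyFst (M : List (Int × Int)) (kg : Int × List (Int × Int))
    (h : kg ∈ pyGroupbyFst M) : ∃ q ∈ M, q.1 = kg.1 := by
  induction M with
  | nil => cases h
  | cons x xs ih =>
    rw [pyGroupbyFst_cons] at h
    rcases hgb : pyGroupbyFst xs with _ | ⟨⟨k, g⟩, rest⟩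
    · rw [hgb] at h
      simp at h
      exact ⟨x, List.mem_cons_self, by rw [h]⟩
    · rw [hgb] at h
      dsimp only at h
      split_ifs at h with he
      · rcases List.mem_cons.mp h with rfl | h'
        · exact ⟨x, List.mem_cons_self, he⟩
        · obtain ⟨q, hq, e⟩ := ih (by rw [hgb]; exact List.mem_cons_of_mem _ h')
          exact ⟨q, List.mem_cons_of_mem _ hq, e⟩
      · rcases List.mem_cons.mp h with rfl | h'
        · exact ⟨x, List.mem_cons_self, rfl⟩
        · obtain ⟨q, hq, e⟩ := ih (by rw [hgb]; exact h')
          exact ⟨q, List.mem_cons_of_mem _ hq, e⟩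

-- a nonempty run of key b followed by material without key b groups as one block
theorem pyGroupbyFst_run (b : Int) (g : List Int) (M : List (Int × Int))
    (hg : g ≠ []) (hM : ∀ q ∈ M, q.1 ≠ b) :
    pyGroupbyFst (g.map (fun i => (b, i)) ++ M)
      = (b, g.map (fun i => (b, i))) :: pyGroupbyFst M := by
  induction g with
  | nil => cases hg rfl
  | cons i g' ih =>
    by_cases hg' : g' = []
    · subst hg'
      rw [List.map_cons, List.map_nil, List.singleton_append, pyGroupbyFst_cons]
      rcases hgb : pyGroupbyFst M with _ | ⟨⟨k, gg⟩, rest⟩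
      · rfl
      · have hk : k ≠ b := by
          obtain ⟨q, hq, e⟩ := key_mem_pyGroupbyFst M (k, gg) (by rw [hgb]; exact List.mem_cons_self)
          exact fun hkb => hM q hq (e.trans hkb)
        dsimp only
        simp [Ne.symm hk]
    · rw [List.map_cons, List.cons_append, pyGroupbyFst_cons, ih hg']
      simp

-- grouping a concatenation of key-tagged blocks (distinct keys) keeps exactly the nonempty blocks
theorem pyGroupbyFst_flat (bs : List (Int × List Int))
    (hk : bs.Pairwise (fun p q => p.1 ≠ q.1)) :
    pyGroupbyFst (bs.flatMap (fun bg => bg.2.map (fun i => (bg.1, i))))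
      = bs.filterMap (fun bg =>
          if bg.2 = [] then none else some (bg.1, bg.2.map (fun i => (bg.1, i)))) := by
  induction bs with
  | nil => rfl
  | cons bg rest ih =>
    rw [List.flatMap_cons, List.filterMap_cons]
    by_cases hge : bg.2 = []
    · simp [hge, ih (List.pairwise_cons.mp hk).2]
    · have hne : ∀ q ∈ rest.flatMap (fun bg => bg.2.map (fun i => (bg.1, i))), q.1 ≠ bg.1 := by
        intro q hq
        rcases List.mem_flatMap.mp hq with ⟨bg', hbg', hq'⟩
        rcases List.mem_map.mp hq' with ⟨i, _, rfl⟩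
        exact fun e => (List.pairwise_cons.mp hk).1 bg' hbg' e.symm
      rw [pyGroupbyFst_run bg.1 bg.2 _ hge hne, ih (List.pairwise_cons.mp hk).2]
      simp [hge]

-- dict built by inserting the groups: lookup of an absent key is untouched …
theorem getD_build_ne (gs : List (Int × List (Int × Int))) (d : PySem.Dict Int (List Int))
    (b : Int) (hb : ∀ bg ∈ gs, bg.1 ≠ b) :
    (gs.foldl (fun d bg => d.insert bg.1 (bg.2.map (·.2))) d).getD b [] = d.getD b [] := by
  induction gs generalizing d with
  | nil => rfl
  | cons hd tl ih =>
    rw [List.foldl_cons, ih _ (fun bg h => hb bg (List.mem_cons_of_mem _ h))]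
    have hne : b ≠ hd.1 := fun e => (hb hd List.mem_cons_self) e.symm
    simp [pysem, hne]

-- … and lookup of a present key (keys pairwise distinct) gives its group
theorem getD_build_mem (gs : List (Int × List (Int × Int))) (d : PySem.Dict Int (List Int))
    (b : Int) (g : List (Int × Int)) (hmem : (b, g) ∈ gs)
    (hk : gs.Pairwise (fun p q => p.1 ≠ q.1)) :
    (gs.foldl (fun d bg => d.insert bg.1 (bg.2.map (·.2))) d).getD b [] = g.map (·.2) := by
  induction gs generalizing d with
  | nil => cases hmem
  | cons hd tl ih =>
    rw [List.foldl_cons]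
    rcases List.mem_cons.mp hmem with rfl | hmem'
    · rw [getD_build_ne tl _ b (fun bg hbg => fun e => (List.pairwise_cons.mp hk).1 bg hbg e.symm)]
      simp [pysem]
    · exact ih _ hmem' (List.pairwise_cons.mp hk).2

-- B's dict lookup equals Gkeys for every bunny in range
theorem grouped_getD (nb : Int) (combos : List (List Int))
    (hsub : ∀ c ∈ combos, c.Sublist (PySem.List.pyRange 0 nb 1)) (b : Int) :
    ((pyGroupbyFst (PySem.List.sorted
          ((PySem.List.enumerate combos 0).flatMap (fun ic => ic.2.map (fun b => (b, ic.1))))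
          (fun t => toLex t))).foldl
        (fun d bg => d.insert bg.1 (bg.2.map (·.2))) PySem.Dict.empty).getD b []
      = Gkeys combos b := by
  rw [spairs_eq nb combos hsub]
  have hflat : (PySem.List.pyRange 0 nb 1).flatMap (fun b => (Gkeys combos b).map (fun i => (b, i)))
      = ((PySem.List.pyRange 0 nb 1).map (fun b => (b, Gkeys combos b))).flatMap
          (fun bg => bg.2.map (fun i => (bg.1, i))) := by
    rw [List.flatMap_map]
  have hbs : ((PySem.List.pyRange 0 nb 1).map (fun b => (b, Gkeys combos b))).Pairwise
      (fun p q => p.1 ≠ q.1) := by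
    rw [List.pairwise_map]
    exact (PySem.List.pairwise_lt_pyRange_one 0 nb).imp (fun h => by simpa using ne_of_lt h)
  rw [hflat, pyGroupbyFst_flat _ hbs]
  have hkgs : (((PySem.List.pyRange 0 nb 1).map (fun b => (b, Gkeys combos b))).filterMap
      (fun bg => if bg.2 = [] then none else some (bg.1, bg.2.map (fun i => (bg.1, i))))).Pairwise
      (fun p q => p.1 ≠ q.1) := by
    rw [List.pairwise_filterMap]
    refine hbs.imp ?_
    intro p q h x hx y hy
    split_ifs at hx hy
    all_goals try cases hx
    all_goals try cases hy
    all_goals exact h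
  by_cases hG : Gkeys combos b = []
  · rw [getD_build_ne]
    · rw [hG]
      simp [pysem]
    · intro bg hbg
      rcases List.mem_filterMap.mp hbg with ⟨src, hsrc, he⟩
      rcases List.mem_map.mp hsrc with ⟨b', _, rfl⟩
      split_ifs at he with hcond
      cases he
      intro e
      apply hcond
      show Gkeys combos b' = []
      have e' : b' = b := e
      rw [e']
      exact hG
  · by_cases hbr : b ∈ PySem.List.pyRange 0 nb 1
    · rw [getD_build_mem _ _ b ((Gkeys combos b).map (fun i => (b, i))) ?_ hkgs]
      · simp
      · apply List.mem_filterMap.mpr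
        exact ⟨(b, Gkeys combos b), List.mem_map.mpr ⟨b, hbr, rfl⟩, by simp [hG]⟩
    · -- b out of range: Gkeys combos b = [] because bunnies lie in range, contradicting hG
      exfalso
      apply hG
      rcases hG' : Gkeys combos b with _ | ⟨i, t⟩
      · rfl
      · exfalso
        have hi : i ∈ Gkeys combos b := by rw [hG']; exact List.mem_cons_self
        rcases (mem_Gkeys combos b i).mp hi with ⟨ic, h1, h2, _⟩
        obtain ⟨k, hk, rfl⟩ := (PySem.List.mem_enumerate_iff _ _ _).mp h1
        exact hbr ((hsub _ (List.getElem_mem hk)).mem h2)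

theorem solution_spec : Claim_equal_solution := by
  intro nb nr _ _
  unfold Spec_solution solution solution_alt
  simp only [pyCombinations_eq]
  apply List.ext_getElem?_iff.mpr
  intro j
  have hsub : ∀ c ∈ PySem.List.combinations (PySem.List.pyRange 0 nb 1) (nb - nr + 1).toNat,
      c.Sublist (PySem.List.pyRange 0 nb 1) :=
    fun c hc => PySem.List.sublist_of_mem_combinations hc
  have hall : ∀ p ∈ PySem.List.enumerate
      (PySem.List.combinations (PySem.List.pyRange 0 nb 1) (nb - nr + 1).toNat) 0,
      p.2.Nodup ∧ ∀ x ∈ p.2, 0 ≤ x ∧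
        x.toNat < ((List.range nb.toNat).map (fun _ => ([] : List Int))).length := by
    intro p hp
    obtain ⟨k, hk, rfl⟩ := (PySem.List.mem_enumerate_iff _ _ _).mp hp
    have hs := hsub _ (List.getElem_mem hk)
    refine ⟨(PySem.List.nodup_pyRange_one 0 nb).sublist hs, ?_⟩
    intro x hx
    have := (PySem.List.mem_pyRange_one).mp (hs.mem hx)
    simp only [List.length_map, List.length_range]
    omega
  rw [outer_get _ _ hall j, List.getElem?_map, List.getElem?_map,
    PySem.List.getElem?_pyRange_one]
  have hgd := grouped_getD nb
    (PySem.List.combinations (PySem.List.pyRange 0 nb 1) (nb - nr + 1).toNat) hsub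
  simp only [Gkeys] at hgd
  by_cases hj : j < nb.toNat
  · rw [List.getElem?_range hj]
    have h2 : j < (nb - 0).toNat := by omega
    simp only [h2, if_pos, Option.map_some]
    rw [hgd (0 + (j : Int))]
    simp
  · rw [List.getElem?_eq_none (by simpa using hj)]
    simp
    omega

-- ===== VERDICT (by name: the statement is the Claim_ definition above) =====
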